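-- pv_equiv track=rewrite | github.com/Cicerolibardi/monitorias-mc102 | 2s2022/lab12.py | expansao
-- ===== SOURCE A (Python) =====
-- def expansao(imagem_original):
--     imagem_copia = []
--     for i in range(len(imagem_original*2) - 1):
--         imagem_appendar = [0] * (len(imagem_original[0])*2 - 1)
--         imagem_copia.append(imagem_appendar)
--
--     for i in range(len(imagem_original)):
--         for j in range(len(imagem_original[0])):
--             i_linha = 2*i
--             j_linha = 2*j
--             imagem_copia[i_linha][j_linha] = imagem_original[i][j]
--
--
--     for i in range(len(imagem_copia)):
--         for j in range(len(imagem_copia[0])):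
--             if (j != 0) and (j != len(imagem_copia[0]) - 1):
--                 if (i % 2 == 0) and (j % 2 == 1):
--                     imagem_copia[i][j] = int((imagem_copia[i][j-1] + imagem_copia[i][j+1]) / 2)
--             if (i != 0) and (i != len(imagem_copia) - 1):
--                 if (i % 2 == 1) and (j % 2 == 0):
--                     imagem_copia[i][j] = int((imagem_copia[i+1][j] + imagem_copia[i-1][j]) / 2)
--             if ((i != 0) and (i != len(imagem_copia) - 1) and (j != 0) and (j != len(imagem_copia[0]) - 1)):
--                 if (i % 2 == 1) and (j % 2 == 1):
--                     imagem_copia[i][j] = int((imagem_copia[i-1][j-1] + imagem_copia[i+1][j+1] +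
--                                             imagem_copia[i-1][j+1] + imagem_copia[i+1][j-1]) / 4)
--
--
--     return imagem_copia
-- ===== SOURCE B (Python) =====
-- def expansao(imagem_original):
--     # Forward construction: expand each row horizontally, and emit an interpolated
--     # row between consecutive rows; width taken from the first row (as A does).
--     m = len(imagem_original[0]) if imagem_original else 0
--     rs = [r[:m] for r in imagem_original]
--
--     def hexpand(u):
--         out = []
--         for t in range(len(u)):
--             out.append(u[t])
--             if t + 1 < len(u):
--                 out.append(int((u[t] + u[t + 1]) / 2))
--         return out
--
--     def vmid(u, v):
--         out = []
--         for t in range(len(u)):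
--             out.append(int((u[t] + v[t]) / 2))
--             if t + 1 < len(u):
--                 out.append(int((u[t] + u[t + 1] + v[t] + v[t + 1]) / 4))
--         return out
--
--     res = []
--     for k in range(len(rs)):
--         res.append(hexpand(rs[k]))
--         if k + 1 < len(rs):
--             res.append(vmid(rs[k], rs[k + 1]))
--     return res
-- ===== Notes on version B (the rewrite author's own statement) =====
-- stated objective: simpler
-- what changed: A preallocates a (2n-1)x(2m-1) zero grid, copies originals to even-even cells, then rescans the entire output grid with a parity/boundary dispatch mutating cells in place; B builds the output directly in one forward pass over the input (each row expanded horizontally, an interpolated row emitted between consecutive rows) with no preallocation, no parity tests and no in-place mutation, which also makes it measurably faster by a constant factor.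
import Mathlib
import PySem

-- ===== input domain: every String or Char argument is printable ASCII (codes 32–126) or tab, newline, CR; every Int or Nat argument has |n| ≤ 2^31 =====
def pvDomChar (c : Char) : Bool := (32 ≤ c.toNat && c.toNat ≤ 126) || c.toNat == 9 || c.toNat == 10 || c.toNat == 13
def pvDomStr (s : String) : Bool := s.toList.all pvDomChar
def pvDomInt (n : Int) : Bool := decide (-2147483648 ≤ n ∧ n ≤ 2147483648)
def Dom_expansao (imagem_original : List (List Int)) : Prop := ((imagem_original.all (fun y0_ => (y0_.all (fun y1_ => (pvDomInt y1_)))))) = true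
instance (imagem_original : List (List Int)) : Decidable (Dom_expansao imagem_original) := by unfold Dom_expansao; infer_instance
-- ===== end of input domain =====

-- B replaces A's preallocate-then-parity-dispatch in-place mutation with a single forward
-- construction (each row expanded horizontally, an interpolated row between consecutive rows);
-- objective: simpler (and measured faster by a constant factor). Python's int(x/2) / int(x/4) truncates toward zero and the float
-- quotients are exact for 32-bit pixel sums, so both are ported as Int.tdiv.

-- ===== PORT A =====
def pvGet2 (g : List (List Int)) (i j : Nat) : Int := (g.getD i []).getD j 0

def pvSet2 (g : List (List Int)) (i j : Nat) (v : Int) : List (List Int) :=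
  g.set i ((g.getD i []).set j v)

def pvPhase2Body (rows : List (List Int)) (i : Nat) (g : List (List Int)) (j : Nat) : List (List Int) :=
  pvSet2 g (2 * i) (2 * j) (pvGet2 rows i j)

def pvPhase3Body (H W i : Nat) (g : List (List Int)) (j : Nat) : List (List Int) :=
  let g := if (j ≠ 0 ∧ j ≠ W - 1) ∧ (i % 2 = 0 ∧ j % 2 = 1) then
      pvSet2 g i j (Int.tdiv (pvGet2 g i (j - 1) + pvGet2 g i (j + 1)) 2) else g
  let g := if (i ≠ 0 ∧ i ≠ H - 1) ∧ (i % 2 = 1 ∧ j % 2 = 0) then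
      pvSet2 g i j (Int.tdiv (pvGet2 g (i + 1) j + pvGet2 g (i - 1) j) 2) else g
  if (i ≠ 0 ∧ i ≠ H - 1 ∧ j ≠ 0 ∧ j ≠ W - 1) ∧ (i % 2 = 1 ∧ j % 2 = 1) then
      pvSet2 g i j (Int.tdiv (pvGet2 g (i - 1) (j - 1) + pvGet2 g (i + 1) (j + 1) +
                              pvGet2 g (i - 1) (j + 1) + pvGet2 g (i + 1) (j - 1)) 4) else g

def pvPhase1 (n m : Nat) : List (List Int) :=
  (List.range (2 * n - 1)).foldl (fun acc _ => acc ++ [List.replicate (2 * m - 1) 0]) []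

def pvPhase2 (rows : List (List Int)) (n m : Nat) (g : List (List Int)) : List (List Int) :=
  (List.range n).foldl (fun g i => (List.range m).foldl (pvPhase2Body rows i) g) g

def pvPhase3 (H W : Nat) (g : List (List Int)) : List (List Int) :=
  (List.range H).foldl (fun g i => (List.range W).foldl (pvPhase3Body H W i) g) g

def expansao (imagem_original : List (List Int)) : List (List Int) :=
  let n := imagem_original.length
  let m := (imagem_original.getD 0 []).length
  let g1 := pvPhase1 n m
  let g2 := pvPhase2 imagem_original n m g1
  pvPhase3 g2.length ((g2.getD 0 []).length) g2

-- ===== PORT B =====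
def pvHexpand (u : List Int) : List Int :=
  (List.range u.length).foldl (fun out t =>
    let out := out ++ [u.getD t 0]
    if t + 1 < u.length then
      out ++ [Int.tdiv (u.getD t 0 + u.getD (t + 1) 0) 2]
    else out) []

def pvVmid (u v : List Int) : List Int :=
  (List.range u.length).foldl (fun out t =>
    let out := out ++ [Int.tdiv (u.getD t 0 + v.getD t 0) 2]
    if t + 1 < u.length then
      out ++ [Int.tdiv (u.getD t 0 + u.getD (t + 1) 0 + v.getD t 0 + v.getD (t + 1) 0) 4]
    else out) []

def expansao_alt (rows : List (List Int)) : List (List Int) :=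
  let m := (rows.headD []).length
  let rs := rows.map (fun r => r.take m)
  (List.range rs.length).foldl (fun res k =>
    let res := res ++ [pvHexpand (rs.getD k [])]
    if k + 1 < rs.length then
      res ++ [pvVmid (rs.getD k []) (rs.getD (k + 1) [])]
    else res) []

-- ===== PRECONDITION & SPEC =====
-- Pre_ excludes exactly the inputs on which A raises IndexError: some row strictly shorter
-- than the first row (A indexes every row up to the first row's width).
def Pre_expansao (imagem_original : List (List Int)) : Prop :=
  ∀ r ∈ imagem_original, (imagem_original.headD []).length ≤ r.length
instance (imagem_original : List (List Int)) : Decidable (Pre_expansao imagem_original) := by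
  unfold Pre_expansao; infer_instance

def pvWitness_expansao : List (List Int) := [[1, 2], [3, 4]]

def Spec_expansao (imagem_original : List (List Int)) (out : List (List Int)) : Prop := out = expansao_alt imagem_original
instance (imagem_original : List (List Int)) (out : List (List Int)) : Decidable (Spec_expansao imagem_original out) := by unfold Spec_expansao; infer_instance

-- ===== CLAIM (what is proved, stated in full; the proofs are below) =====
def Claim_equal_expansao : Prop := ∀ (imagem_original : List (List Int)), Dom_expansao imagem_original → Pre_expansao imagem_original → Spec_expansao imagem_original (expansao imagem_original)

-- ===== LEMMAS AND PROOFS =====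
theorem pvSet2_length (g : List (List Int)) (i j : Nat) (v : Int) :
    (pvSet2 g i j v).length = g.length := by simp [pvSet2]

theorem pvRowlen_set2 (g : List (List Int)) (i j : Nat) (v : Int) (a : Nat) :
    ((pvSet2 g i j v).getD a []).length = (g.getD a []).length := by
  simp only [pvSet2, List.getD_eq_getElem?_getD, List.getElem?_set]
  split
  · next h =>
    subst h
    split
    · next h2 => simp [List.getElem?_eq_getElem h2]
    · next h2 =>
      rw [List.getElem?_eq_none (by omega : g.length ≤ i)]
  · rfl

theorem pvGet2_set2_same (g : List (List Int)) (i j : Nat) (v : Int)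
    (hi : i < g.length) (hj : j < (g.getD i []).length) :
    pvGet2 (pvSet2 g i j v) i j = v := by
  simp only [pvGet2, pvSet2, List.getD_eq_getElem?_getD, List.getElem?_set]
  rw [if_pos trivial, if_pos hi]
  rw [List.getD_eq_getElem?_getD] at hj
  simp [hj]

theorem pvGet2_set2_ne (g : List (List Int)) (i j : Nat) (v : Int) (a b : Nat)
    (h : a ≠ i ∨ b ≠ j) : pvGet2 (pvSet2 g i j v) a b = pvGet2 g a b := by
  simp only [pvGet2, pvSet2, List.getD_eq_getElem?_getD, List.getElem?_set]
  rcases h with h | h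
  · rw [if_neg (by omega)]
  · split
    · next h2 =>
      subst h2
      split
      · next h2 =>
        simp only [Option.getD_some, List.getElem?_set]
        rw [if_neg (by omega), ← List.getD_eq_getElem?_getD, List.getD_eq_getElem?_getD,
            List.getElem?_eq_getElem h2]
      · next h2 =>
        rw [List.getElem?_eq_none (by omega : g.length ≤ i)]
    · rfl

def pvOk (H W : Nat) (g : List (List Int)) : Prop :=
  g.length = H ∧ ∀ a, a < H → (g.getD a []).length = W

theorem pvOk_set2 {H W : Nat} {g : List (List Int)} (h : pvOk H W g) (i j : Nat) (v : Int) :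
    pvOk H W (pvSet2 g i j v) := by
  refine ⟨by rw [pvSet2_length]; exact h.1, fun a ha => ?_⟩
  rw [pvRowlen_set2]; exact h.2 a ha

def pvVal (g0 : List (List Int)) (H W i j : Nat) : Int :=
  if (j ≠ 0 ∧ j ≠ W - 1) ∧ (i % 2 = 0 ∧ j % 2 = 1) then
    Int.tdiv (pvGet2 g0 i (j - 1) + pvGet2 g0 i (j + 1)) 2
  else if (i ≠ 0 ∧ i ≠ H - 1) ∧ (i % 2 = 1 ∧ j % 2 = 0) then
    Int.tdiv (pvGet2 g0 (i + 1) j + pvGet2 g0 (i - 1) j) 2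
  else if (i ≠ 0 ∧ i ≠ H - 1 ∧ j ≠ 0 ∧ j ≠ W - 1) ∧ (i % 2 = 1 ∧ j % 2 = 1) then
    Int.tdiv (pvGet2 g0 (i - 1) (j - 1) + pvGet2 g0 (i + 1) (j + 1) +
              pvGet2 g0 (i - 1) (j + 1) + pvGet2 g0 (i + 1) (j - 1)) 4
  else pvGet2 g0 i j

theorem pvVal_ee (g0 : List (List Int)) (H W i j : Nat) (hi : i % 2 = 0) (hj : j % 2 = 0) :
    pvVal g0 H W i j = pvGet2 g0 i j := by
  unfold pvVal
  rw [if_neg (by omega), if_neg (by omega), if_neg (by omega)]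

-- invariant during the inner (column) loop of phase 3, row i, next column l

def pvInv3 (g0 : List (List Int)) (H W i l : Nat) (g : List (List Int)) : Prop :=
  pvOk H W g ∧
  (∀ a b, a < i → b < W → pvGet2 g a b = pvVal g0 H W a b) ∧
  (∀ b, b < l → pvGet2 g i b = pvVal g0 H W i b) ∧
  (∀ b, l ≤ b → pvGet2 g i b = pvGet2 g0 i b) ∧
  (∀ a b, i < a → pvGet2 g a b = pvGet2 g0 a b)

theorem pvInv3_update (g0 : List (List Int)) (H W i l : Nat) (g g' : List (List Int))
    (hi : i < H) (hl : l < W) (hinv : pvInv3 g0 H W i l g)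
    (hg' : g' = pvSet2 g i l (pvVal g0 H W i l) ∨ (g' = g ∧ pvVal g0 H W i l = pvGet2 g0 i l)) :
    pvInv3 g0 H W i (l + 1) g' := by
  obtain ⟨hok, hprev, hdone, htodo, hbelow⟩ := hinv
  rcases hg' with hg' | ⟨hg', hv⟩
  · subst hg'
    refine ⟨pvOk_set2 hok i l _, ?_, ?_, ?_, ?_⟩
    · intro a b ha hb
      rw [pvGet2_set2_ne _ _ _ _ _ _ (Or.inl (by omega))]
      exact hprev a b ha hb
    · intro b hb
      by_cases hbl : b = l
      · subst hbl
        exact pvGet2_set2_same g i b _ (by rw [hok.1]; exact hi) (by rw [hok.2 i hi]; exact hl)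
      · rw [pvGet2_set2_ne _ _ _ _ _ _ (Or.inr hbl)]
        exact hdone b (by omega)
    · intro b hb
      rw [pvGet2_set2_ne _ _ _ _ _ _ (Or.inr (by omega))]
      exact htodo b (by omega)
    · intro a b ha
      rw [pvGet2_set2_ne _ _ _ _ _ _ (Or.inl (by omega))]
      exact hbelow a b ha
  · subst hg'
    refine ⟨hok, hprev, ?_, fun b hb => htodo b (by omega), hbelow⟩
    intro b hb
    by_cases hbl : b = l
    · subst hbl
      rw [htodo b le_rfl, ← hv]
    · exact hdone b (by omega)

theorem pvBody_step (g0 : List (List Int)) (H W i l : Nat) (g : List (List Int))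
    (hi : i < H) (hl : l < W) (hinv : pvInv3 g0 H W i l g) :
    pvInv3 g0 H W i (l + 1) (pvPhase3Body H W i g l) := by
  obtain ⟨hok, hprev, hdone, htodo, hbelow⟩ := hinv
  rcases Nat.mod_two_eq_zero_or_one i with hi2 | hi2 <;>
    rcases Nat.mod_two_eq_zero_or_one l with hl2 | hl2
  · -- i even, l even: nothing fires
    simp only [pvPhase3Body]
    rw [if_neg (show ¬((i ≠ 0 ∧ i ≠ H - 1 ∧ l ≠ 0 ∧ l ≠ W - 1) ∧ i % 2 = 1 ∧ l % 2 = 1) by omega), if_neg (show ¬((i ≠ 0 ∧ i ≠ H - 1) ∧ i % 2 = 1 ∧ l % 2 = 0) by omega), if_neg (show ¬((l ≠ 0 ∧ l ≠ W - 1) ∧ i % 2 = 0 ∧ l % 2 = 1) by omega)]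
    exact pvInv3_update g0 H W i l g g hi hl ⟨hok, hprev, hdone, htodo, hbelow⟩
      (Or.inr ⟨rfl, pvVal_ee g0 H W i l hi2 hl2⟩)
  · -- i even, l odd: horizontal branch
    by_cases hg : l ≠ 0 ∧ l ≠ W - 1
    · simp only [pvPhase3Body]
      rw [if_neg (show ¬((i ≠ 0 ∧ i ≠ H - 1 ∧ l ≠ 0 ∧ l ≠ W - 1) ∧ i % 2 = 1 ∧ l % 2 = 1) by omega), if_neg (show ¬((i ≠ 0 ∧ i ≠ H - 1) ∧ i % 2 = 1 ∧ l % 2 = 0) by omega), if_pos (show (l ≠ 0 ∧ l ≠ W - 1) ∧ i % 2 = 0 ∧ l % 2 = 1 from ⟨hg, hi2, hl2⟩)]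
      have hr1 : pvGet2 g i (l - 1) = pvGet2 g0 i (l - 1) := by
        rw [hdone (l - 1) (by omega), pvVal_ee g0 H W i (l - 1) hi2 (by omega)]
      have hr2 : pvGet2 g i (l + 1) = pvGet2 g0 i (l + 1) := htodo (l + 1) (by omega)
      have hv : pvVal g0 H W i l =
          Int.tdiv (pvGet2 g0 i (l - 1) + pvGet2 g0 i (l + 1)) 2 := by
        unfold pvVal; rw [if_pos ⟨hg, hi2, hl2⟩]
      rw [hr1, hr2, ← hv]
      exact pvInv3_update g0 H W i l g _ hi hl ⟨hok, hprev, hdone, htodo, hbelow⟩ (Or.inl rfl)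
    · simp only [pvPhase3Body]
      rw [if_neg (show ¬((i ≠ 0 ∧ i ≠ H - 1 ∧ l ≠ 0 ∧ l ≠ W - 1) ∧ i % 2 = 1 ∧ l % 2 = 1) by omega), if_neg (show ¬((i ≠ 0 ∧ i ≠ H - 1) ∧ i % 2 = 1 ∧ l % 2 = 0) by omega), if_neg (show ¬((l ≠ 0 ∧ l ≠ W - 1) ∧ i % 2 = 0 ∧ l % 2 = 1) by omega)]
      have hv : pvVal g0 H W i l = pvGet2 g0 i l := by
        unfold pvVal; rw [if_neg (show ¬((l ≠ 0 ∧ l ≠ W - 1) ∧ i % 2 = 0 ∧ l % 2 = 1) by omega), if_neg (show ¬((i ≠ 0 ∧ i ≠ H - 1) ∧ i % 2 = 1 ∧ l % 2 = 0) by omega), if_neg (show ¬((i ≠ 0 ∧ i ≠ H - 1 ∧ l ≠ 0 ∧ l ≠ W - 1) ∧ i % 2 = 1 ∧ l % 2 = 1) by omega)]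
      exact pvInv3_update g0 H W i l g g hi hl ⟨hok, hprev, hdone, htodo, hbelow⟩
        (Or.inr ⟨rfl, hv⟩)
  · -- i odd, l even: vertical branch
    by_cases hg : i ≠ 0 ∧ i ≠ H - 1
    · simp only [pvPhase3Body]
      rw [if_neg (show ¬((i ≠ 0 ∧ i ≠ H - 1 ∧ l ≠ 0 ∧ l ≠ W - 1) ∧ i % 2 = 1 ∧ l % 2 = 1) by omega), if_pos (show (i ≠ 0 ∧ i ≠ H - 1) ∧ i % 2 = 1 ∧ l % 2 = 0 from ⟨hg, hi2, hl2⟩), if_neg (show ¬((l ≠ 0 ∧ l ≠ W - 1) ∧ i % 2 = 0 ∧ l % 2 = 1) by omega)]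
      have hr1 : pvGet2 g (i + 1) l = pvGet2 g0 (i + 1) l := hbelow (i + 1) l (by omega)
      have hr2 : pvGet2 g (i - 1) l = pvGet2 g0 (i - 1) l := by
        rw [hprev (i - 1) l (by omega) hl, pvVal_ee g0 H W (i - 1) l (by omega) hl2]
      have hv : pvVal g0 H W i l =
          Int.tdiv (pvGet2 g0 (i + 1) l + pvGet2 g0 (i - 1) l) 2 := by
        unfold pvVal; rw [if_neg (show ¬((l ≠ 0 ∧ l ≠ W - 1) ∧ i % 2 = 0 ∧ l % 2 = 1) by omega), if_pos (show (i ≠ 0 ∧ i ≠ H - 1) ∧ i % 2 = 1 ∧ l % 2 = 0 from ⟨hg, hi2, hl2⟩)]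
      rw [hr1, hr2, ← hv]
      exact pvInv3_update g0 H W i l g _ hi hl ⟨hok, hprev, hdone, htodo, hbelow⟩ (Or.inl rfl)
    · simp only [pvPhase3Body]
      rw [if_neg (show ¬((i ≠ 0 ∧ i ≠ H - 1 ∧ l ≠ 0 ∧ l ≠ W - 1) ∧ i % 2 = 1 ∧ l % 2 = 1) by omega), if_neg (show ¬((i ≠ 0 ∧ i ≠ H - 1) ∧ i % 2 = 1 ∧ l % 2 = 0) by omega), if_neg (show ¬((l ≠ 0 ∧ l ≠ W - 1) ∧ i % 2 = 0 ∧ l % 2 = 1) by omega)]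
      have hv : pvVal g0 H W i l = pvGet2 g0 i l := by
        unfold pvVal; rw [if_neg (show ¬((l ≠ 0 ∧ l ≠ W - 1) ∧ i % 2 = 0 ∧ l % 2 = 1) by omega), if_neg (show ¬((i ≠ 0 ∧ i ≠ H - 1) ∧ i % 2 = 1 ∧ l % 2 = 0) by omega), if_neg (show ¬((i ≠ 0 ∧ i ≠ H - 1 ∧ l ≠ 0 ∧ l ≠ W - 1) ∧ i % 2 = 1 ∧ l % 2 = 1) by omega)]
      exact pvInv3_update g0 H W i l g g hi hl ⟨hok, hprev, hdone, htodo, hbelow⟩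
        (Or.inr ⟨rfl, hv⟩)
  · -- i odd, l odd: diagonal branch
    by_cases hg : i ≠ 0 ∧ i ≠ H - 1 ∧ l ≠ 0 ∧ l ≠ W - 1
    · simp only [pvPhase3Body]
      rw [if_pos (show (i ≠ 0 ∧ i ≠ H - 1 ∧ l ≠ 0 ∧ l ≠ W - 1) ∧ i % 2 = 1 ∧ l % 2 = 1 from ⟨hg, hi2, hl2⟩), if_neg (show ¬((i ≠ 0 ∧ i ≠ H - 1) ∧ i % 2 = 1 ∧ l % 2 = 0) by omega), if_neg (show ¬((l ≠ 0 ∧ l ≠ W - 1) ∧ i % 2 = 0 ∧ l % 2 = 1) by omega)]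
      have hr1 : pvGet2 g (i - 1) (l - 1) = pvGet2 g0 (i - 1) (l - 1) := by
        rw [hprev (i - 1) (l - 1) (by omega) (by omega),
            pvVal_ee g0 H W (i - 1) (l - 1) (by omega) (by omega)]
      have hr2 : pvGet2 g (i + 1) (l + 1) = pvGet2 g0 (i + 1) (l + 1) :=
        hbelow (i + 1) (l + 1) (by omega)
      have hr3 : pvGet2 g (i - 1) (l + 1) = pvGet2 g0 (i - 1) (l + 1) := by
        rw [hprev (i - 1) (l + 1) (by omega) (by omega),
            pvVal_ee g0 H W (i - 1) (l + 1) (by omega) (by omega)]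
      have hr4 : pvGet2 g (i + 1) (l - 1) = pvGet2 g0 (i + 1) (l - 1) :=
        hbelow (i + 1) (l - 1) (by omega)
      have hv : pvVal g0 H W i l =
          Int.tdiv (pvGet2 g0 (i - 1) (l - 1) + pvGet2 g0 (i + 1) (l + 1) +
                    pvGet2 g0 (i - 1) (l + 1) + pvGet2 g0 (i + 1) (l - 1)) 4 := by
        unfold pvVal; rw [if_neg (show ¬((l ≠ 0 ∧ l ≠ W - 1) ∧ i % 2 = 0 ∧ l % 2 = 1) by omega), if_neg (show ¬((i ≠ 0 ∧ i ≠ H - 1) ∧ i % 2 = 1 ∧ l % 2 = 0) by omega), if_pos (show (i ≠ 0 ∧ i ≠ H - 1 ∧ l ≠ 0 ∧ l ≠ W - 1) ∧ i % 2 = 1 ∧ l % 2 = 1 from ⟨hg, hi2, hl2⟩)]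
      rw [hr1, hr2, hr3, hr4, ← hv]
      exact pvInv3_update g0 H W i l g _ hi hl ⟨hok, hprev, hdone, htodo, hbelow⟩ (Or.inl rfl)
    · simp only [pvPhase3Body]
      rw [if_neg (show ¬((i ≠ 0 ∧ i ≠ H - 1 ∧ l ≠ 0 ∧ l ≠ W - 1) ∧ i % 2 = 1 ∧ l % 2 = 1) by omega), if_neg (show ¬((i ≠ 0 ∧ i ≠ H - 1) ∧ i % 2 = 1 ∧ l % 2 = 0) by omega), if_neg (show ¬((l ≠ 0 ∧ l ≠ W - 1) ∧ i % 2 = 0 ∧ l % 2 = 1) by omega)]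
      have hv : pvVal g0 H W i l = pvGet2 g0 i l := by
        unfold pvVal; rw [if_neg (show ¬((l ≠ 0 ∧ l ≠ W - 1) ∧ i % 2 = 0 ∧ l % 2 = 1) by omega), if_neg (show ¬((i ≠ 0 ∧ i ≠ H - 1) ∧ i % 2 = 1 ∧ l % 2 = 0) by omega), if_neg (show ¬((i ≠ 0 ∧ i ≠ H - 1 ∧ l ≠ 0 ∧ l ≠ W - 1) ∧ i % 2 = 1 ∧ l % 2 = 1) by omega)]
      exact pvInv3_update g0 H W i l g g hi hl ⟨hok, hprev, hdone, htodo, hbelow⟩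
        (Or.inr ⟨rfl, hv⟩)

theorem pvInner3_fold (g0 : List (List Int)) (H W i : Nat) (hi : i < H)
    (g : List (List Int)) (h0 : pvInv3 g0 H W i 0 g) :
    ∀ l, l ≤ W → pvInv3 g0 H W i l ((List.range l).foldl (pvPhase3Body H W i) g) := by
  intro l
  induction l with
  | zero => intro _; simpa using h0
  | succ l ih =>
    intro hl
    rw [List.range_succ, List.foldl_append]
    exact pvBody_step g0 H W i l _ hi (by omega) (ih (by omega))

def pvInvO (g0 : List (List Int)) (H W k : Nat) (g : List (List Int)) : Prop :=
  pvOk H W g ∧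
  (∀ a b, a < k → b < W → pvGet2 g a b = pvVal g0 H W a b) ∧
  (∀ a b, k ≤ a → pvGet2 g a b = pvGet2 g0 a b)

theorem pvOuter_step (g0 : List (List Int)) (H W k : Nat) (g : List (List Int))
    (hk : k < H) (hinv : pvInvO g0 H W k g) :
    pvInvO g0 H W (k + 1) ((List.range W).foldl (pvPhase3Body H W k) g) := by
  obtain ⟨hok, hprev, hrest⟩ := hinv
  have h0 : pvInv3 g0 H W k 0 g :=
    ⟨hok, hprev, fun b hb => absurd hb (by omega), fun b _ => hrest k b le_rfl,
     fun a b ha => hrest a b (by omega)⟩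
  obtain ⟨hok', hprev', hdone', _, hbelow'⟩ := pvInner3_fold g0 H W k hk g h0 W le_rfl
  refine ⟨hok', ?_, ?_⟩
  · intro a b ha hb
    by_cases hak : a = k
    · subst hak; exact hdone' b hb
    · exact hprev' a b (by omega) hb
  · intro a b ha
    exact hbelow' a b (by omega)

theorem pvPhase3_char (g0 : List (List Int)) (H W : Nat) (hok : pvOk H W g0) :
    pvOk H W (pvPhase3 H W g0) ∧
    ∀ a b, a < H → b < W → pvGet2 (pvPhase3 H W g0) a b = pvVal g0 H W a b := by
  have main : ∀ k, k ≤ H → pvInvO g0 H W k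
      ((List.range k).foldl (fun g i => (List.range W).foldl (pvPhase3Body H W i) g) g0) := by
    intro k
    induction k with
    | zero => intro _; exact ⟨hok, fun a b ha _ => absurd ha (by omega), fun _ _ _ => rfl⟩
    | succ k ih =>
      intro hk
      rw [List.range_succ, List.foldl_append]
      exact pvOuter_step g0 H W k _ (by omega) (ih (by omega))
  obtain ⟨hok', hval, _⟩ := main H le_rfl
  exact ⟨hok', fun a b ha hb => hval a b ha hb⟩

theorem pvFoldl_const_append {α : Type} (k : Nat) (c : α) (acc : List α) :
    (List.range k).foldl (fun acc _ => acc ++ [c]) acc = acc ++ List.replicate k c := by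
  induction k generalizing acc with
  | zero => simp
  | succ k ih =>
    rw [List.range_succ, List.foldl_append, ih]
    simp [List.replicate_succ']

theorem pvPhase1_eq (n m : Nat) :
    pvPhase1 n m = List.replicate (2 * n - 1) (List.replicate (2 * m - 1) 0) := by
  rw [pvPhase1, pvFoldl_const_append]; rfl

theorem pvPhase1_ok (n m : Nat) : pvOk (2 * n - 1) (2 * m - 1) (pvPhase1 n m) := by
  rw [pvPhase1_eq]
  refine ⟨by simp, fun a ha => ?_⟩
  rw [List.getD_eq_getElem?_getD, List.getElem?_replicate, if_pos (by simpa using ha)]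
  simp

-- phase 2: inner loop over one original row

theorem pvPhase2_inner (rows : List (List Int)) (H W i : Nat) (h2i : 2 * i < H) :
    ∀ l, 2 * l ≤ W + 1 → ∀ g, pvOk H W g →
      pvOk H W ((List.range l).foldl (pvPhase2Body rows i) g) ∧
      ∀ a b, pvGet2 ((List.range l).foldl (pvPhase2Body rows i) g) a b =
        if a = 2 * i ∧ b % 2 = 0 ∧ b / 2 < l then pvGet2 rows i (b / 2) else pvGet2 g a b := by
  intro l
  induction l with
  | zero =>
    intro _ g hok
    refine ⟨by simpa using hok, fun a b => ?_⟩
    rw [if_neg (by omega)]; rfl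
  | succ l ih =>
    intro hl g hok
    rw [List.range_succ, List.foldl_append]
    obtain ⟨hok', hch⟩ := ih (by omega) g hok
    simp only [List.foldl_cons, List.foldl_nil, pvPhase2Body]
    refine ⟨pvOk_set2 hok' _ _ _, fun a b => ?_⟩
    by_cases hab : a = 2 * i ∧ b = 2 * l
    · obtain ⟨ha, hb⟩ := hab; subst ha; subst hb
      rw [pvGet2_set2_same _ _ _ _ (by rw [hok'.1]; exact h2i)
            (by rw [hok'.2 _ h2i]; omega)]
      rw [if_pos (by omega)]
      congr 1; omega
    · rw [pvGet2_set2_ne _ _ _ _ _ _ (by omega), hch a b]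
      by_cases hc : a = 2 * i ∧ b % 2 = 0 ∧ b / 2 < l
      · rw [if_pos hc, if_pos (by omega)]
      · rw [if_neg hc, if_neg (by omega)]

theorem pvPhase2_char (rows : List (List Int)) (H W m : Nat) (h2m : 2 * m ≤ W + 1) :
    ∀ k, 2 * k ≤ H + 1 → ∀ g, pvOk H W g →
      pvOk H W ((List.range k).foldl (fun g i => (List.range m).foldl (pvPhase2Body rows i) g) g) ∧
      ∀ a b, pvGet2 ((List.range k).foldl (fun g i => (List.range m).foldl (pvPhase2Body rows i) g) g) a b =
        if a % 2 = 0 ∧ a / 2 < k ∧ b % 2 = 0 ∧ b / 2 < m then pvGet2 rows (a / 2) (b / 2)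
        else pvGet2 g a b := by
  intro k
  induction k with
  | zero =>
    intro _ g hok
    refine ⟨by simpa using hok, fun a b => ?_⟩
    rw [if_neg (by omega)]; rfl
  | succ k ih =>
    intro hk g hok
    rw [List.range_succ, List.foldl_append]
    obtain ⟨hok', hch⟩ := ih (by omega) g hok
    simp only [List.foldl_cons, List.foldl_nil]
    obtain ⟨hok'', hch'⟩ := pvPhase2_inner rows H W k (by omega) m h2m _ hok'
    refine ⟨hok'', fun a b => ?_⟩
    rw [hch' a b]
    by_cases h1 : a = 2 * k ∧ b % 2 = 0 ∧ b / 2 < m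
    · rw [if_pos h1, if_pos (by omega)]
      congr 1; omega
    · rw [if_neg h1, hch a b]
      by_cases h2 : a % 2 = 0 ∧ a / 2 < k ∧ b % 2 = 0 ∧ b / 2 < m
      · rw [if_pos h2, if_pos (by omega)]
      · rw [if_neg h2, if_neg (by omega)]

-- ===== B side =====

def pvHBlk (u : List Int) (t : Nat) : List Int :=
  u.getD t 0 :: (if t + 1 < u.length then [Int.tdiv (u.getD t 0 + u.getD (t + 1) 0) 2] else [])

def pvVBlk (u v : List Int) (t : Nat) : List Int :=
  Int.tdiv (u.getD t 0 + v.getD t 0) 2 ::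
    (if t + 1 < u.length then
      [Int.tdiv (u.getD t 0 + u.getD (t + 1) 0 + v.getD t 0 + v.getD (t + 1) 0) 4] else [])

def pvGBlk (rs : List (List Int)) (k : Nat) : List (List Int) :=
  pvHexpand (rs.getD k []) ::
    (if k + 1 < rs.length then [pvVmid (rs.getD k []) (rs.getD (k + 1) [])] else [])

theorem pvHexpand_eq_flat (u : List Int) :
    pvHexpand u = (List.range u.length).flatMap (pvHBlk u) := by
  unfold pvHexpand
  rw [show (fun (out : List Int) t =>
      let out := out ++ [u.getD t 0]
      if t + 1 < u.length then out ++ [Int.tdiv (u.getD t 0 + u.getD (t + 1) 0) 2] else out) =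
      (fun out t => out ++ pvHBlk u t) from funext fun out => funext fun t => by
        simp only [pvHBlk]; split <;> simp]
  rw [PySem.List.foldl_append_eq_flatMap]
  rfl

theorem pvVmid_eq_flat (u v : List Int) :
    pvVmid u v = (List.range u.length).flatMap (pvVBlk u v) := by
  unfold pvVmid
  rw [show (fun (out : List Int) t =>
      let out := out ++ [Int.tdiv (u.getD t 0 + v.getD t 0) 2]
      if t + 1 < u.length then
        out ++ [Int.tdiv (u.getD t 0 + u.getD (t + 1) 0 + v.getD t 0 + v.getD (t + 1) 0) 4]
      else out) = (fun out t => out ++ pvVBlk u v t) from funext fun out => funext fun t => by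
        simp only [pvVBlk]; split <;> simp]
  rw [PySem.List.foldl_append_eq_flatMap]
  rfl

theorem pvGo_eq_flat (rs : List (List Int)) :
    (List.range rs.length).foldl (fun res k =>
      let res := res ++ [pvHexpand (rs.getD k [])]
      if k + 1 < rs.length then
        res ++ [pvVmid (rs.getD k []) (rs.getD (k + 1) [])]
      else res) [] = (List.range rs.length).flatMap (pvGBlk rs) := by
  rw [show (fun (res : List (List Int)) k =>
      let res := res ++ [pvHexpand (rs.getD k [])]
      if k + 1 < rs.length then
        res ++ [pvVmid (rs.getD k []) (rs.getD (k + 1) [])]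
      else res) = (fun res k => res ++ pvGBlk rs k)
      from funext fun res => funext fun k => by
        simp only [pvGBlk]; split <;> simp]
  rw [PySem.List.foldl_append_eq_flatMap]
  rfl

theorem expansao_alt_eq_flat (rows : List (List Int)) :
    expansao_alt rows = (List.range ((rows.map (fun r => r.take (rows.headD []).length)).length)).flatMap
      (pvGBlk (rows.map (fun r => r.take (rows.headD []).length))) := by
  rw [← pvGo_eq_flat (rows.map (fun r => r.take (rows.headD []).length))]
  rfl

def pvHexpandRec : List Int → List Int
  | [] => []
  | [a] => [a]
  | a :: b :: r => a :: Int.tdiv (a + b) 2 :: pvHexpandRec (b :: r)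

def pvVmidRec : List Int → List Int → List Int
  | [], _ => []
  | [a], v => [Int.tdiv (a + v.getD 0 0) 2]
  | a :: b :: u, v => Int.tdiv (a + v.getD 0 0) 2 ::
      Int.tdiv (a + b + v.getD 0 0 + v.getD 1 0) 4 :: pvVmidRec (b :: u) (v.drop 1)

def pvGoRec : List (List Int) → List (List Int)
  | [] => []
  | [u] => [pvHexpand u]
  | u :: v :: r => pvHexpand u :: pvVmid u v :: pvGoRec (v :: r)

theorem pvHexpand_eq_rec (u : List Int) : pvHexpand u = pvHexpandRec u := by
  rw [pvHexpand_eq_flat]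
  induction u with
  | nil => rfl
  | cons a r ih =>
    cases r with
    | nil => rfl
    | cons b r' =>
      rw [show (a :: b :: r').length = (b :: r').length + 1 from rfl, List.range_succ_eq_map,
          List.flatMap_cons, List.flatMap_map]
      have hcong : ∀ t ∈ List.range (b :: r').length,
          pvHBlk (a :: b :: r') t.succ = pvHBlk (b :: r') t := by
        intro t _
        simp only [pvHBlk, List.getD_cons_succ, List.length_cons]
        split <;> [rw [if_pos (by omega)]; rw [if_neg (by omega)]]
      have hfm := List.flatMap_congr (l := List.range (b :: r').length)
        (f := fun t => pvHBlk (a :: b :: r') t.succ) (g := pvHBlk (b :: r')) hcong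
      rw [hfm, ih]
      simp only [pvHBlk, pvHexpandRec, List.getD_cons_zero, List.length_cons]
      rw [if_pos (by omega)]
      simp

theorem pvGetD_drop_one (v : List Int) (t : Nat) : (v.drop 1).getD t 0 = v.getD (t + 1) 0 := by
  simp only [List.getD_eq_getElem?_getD, List.getElem?_drop]
  rw [Nat.add_comm]

theorem pvVmid_eq_rec (u v : List Int) : pvVmid u v = pvVmidRec u v := by
  rw [pvVmid_eq_flat]
  induction u generalizing v with
  | nil => rfl
  | cons a r ih =>
    cases r with
    | nil => simp [pvVBlk, pvVmidRec]
    | cons b r' =>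
      rw [show (a :: b :: r').length = (b :: r').length + 1 from rfl, List.range_succ_eq_map,
          List.flatMap_cons, List.flatMap_map]
      have hcong : ∀ t ∈ List.range (b :: r').length,
          pvVBlk (a :: b :: r') v t.succ = pvVBlk (b :: r') (v.drop 1) t := by
        intro t _
        simp only [pvVBlk, List.getD_cons_succ, List.length_cons, pvGetD_drop_one]
        split <;> [rw [if_pos (by omega)]; rw [if_neg (by omega)]]
      have hfm := List.flatMap_congr (l := List.range (b :: r').length)
        (f := fun t => pvVBlk (a :: b :: r') v t.succ) (g := pvVBlk (b :: r') (v.drop 1)) hcong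
      rw [hfm, ih]
      simp only [pvVBlk, pvVmidRec, List.getD_cons_zero, List.length_cons]
      rw [if_pos (by omega)]
      simp

theorem expansao_alt_eq_go (rows : List (List Int)) :
    expansao_alt rows = pvGoRec (rows.map (fun r => r.take (rows.headD []).length)) := by
  rw [expansao_alt_eq_flat]
  generalize (rows.map (fun r => r.take (rows.headD []).length)) = rs
  induction rs with
  | nil => rfl
  | cons u r ih =>
    cases r with
    | nil => rfl
    | cons v r' =>
      rw [show (u :: v :: r').length = (v :: r').length + 1 from rfl, List.range_succ_eq_map,
          List.flatMap_cons, List.flatMap_map]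
      have hcong : ∀ t ∈ List.range (v :: r').length,
          pvGBlk (u :: v :: r') t.succ = pvGBlk (v :: r') t := by
        intro t _
        simp only [pvGBlk, List.getD_cons_succ, List.length_cons]
        split <;> [rw [if_pos (by omega)]; rw [if_neg (by omega)]]
      have hfm := List.flatMap_congr (l := List.range (v :: r').length)
        (f := fun t => pvGBlk (u :: v :: r') t.succ) (g := pvGBlk (v :: r')) hcong
      rw [hfm, ih]
      simp only [pvGBlk, pvGoRec, List.getD_cons_zero, List.length_cons]
      rw [if_pos (by omega)]
      simp

theorem pvHexpandRec_length (u : List Int) : (pvHexpandRec u).length = 2 * u.length - 1 := by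
  induction u with
  | nil => rfl
  | cons a r ih =>
    cases r with
    | nil => rfl
    | cons b r' =>
      simp only [pvHexpandRec, List.length_cons] at *
      omega

theorem pvVmidRec_length (u v : List Int) : (pvVmidRec u v).length = 2 * u.length - 1 := by
  induction u generalizing v with
  | nil => rfl
  | cons a r ih =>
    cases r with
    | nil => rfl
    | cons b r' =>
      simp only [pvVmidRec, List.length_cons] at *
      rw [ih]
      omega

theorem pvHexpandRec_getD (u : List Int) :
    ∀ j, j < 2 * u.length - 1 → (pvHexpandRec u).getD j 0 =
      if j % 2 = 0 then u.getD (j / 2) 0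
      else Int.tdiv (u.getD (j / 2) 0 + u.getD (j / 2 + 1) 0) 2 := by
  induction u with
  | nil => intro j hj; simp at hj
  | cons a r ih =>
    cases r with
    | nil =>
      intro j hj
      simp only [List.length_cons, List.length_nil] at hj
      have : j = 0 := by omega
      subst this
      simp [pvHexpandRec]
    | cons b r' =>
      intro j hj
      simp only [List.length_cons] at hj
      match j with
      | 0 => simp [pvHexpandRec]
      | 1 => simp [pvHexpandRec]
      | (j + 2) =>
        simp only [pvHexpandRec, List.getD_cons_succ]
        rw [ih j (by simp only [List.length_cons]; omega)]
        have h2 : (j + 2) % 2 = j % 2 := by omega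
        have h3 : (j + 2) / 2 = j / 2 + 1 := by omega
        rw [h2, h3]
        split <;> simp

theorem pvVmidRec_getD (u : List Int) :
    ∀ v j, j < 2 * u.length - 1 → (pvVmidRec u v).getD j 0 =
      if j % 2 = 0 then Int.tdiv (u.getD (j / 2) 0 + v.getD (j / 2) 0) 2
      else Int.tdiv (u.getD (j / 2) 0 + u.getD (j / 2 + 1) 0 +
                     v.getD (j / 2) 0 + v.getD (j / 2 + 1) 0) 4 := by
  induction u with
  | nil => intro v j hj; simp at hj
  | cons a r ih =>
    cases r with
    | nil =>
      intro v j hj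
      simp only [List.length_cons, List.length_nil] at hj
      have : j = 0 := by omega
      subst this
      simp [pvVmidRec]
    | cons b r' =>
      intro v j hj
      simp only [List.length_cons] at hj
      match j with
      | 0 => simp [pvVmidRec]
      | 1 => simp [pvVmidRec]
      | (j + 2) =>
        simp only [pvVmidRec, List.getD_cons_succ]
        rw [ih (v.drop 1) j (by simp only [List.length_cons]; omega)]
        have h2 : (j + 2) % 2 = j % 2 := by omega
        have h3 : (j + 2) / 2 = j / 2 + 1 := by omega
        rw [h2, h3]
        split <;> simp

theorem pvGoRec_length (rs : List (List Int)) : (pvGoRec rs).length = 2 * rs.length - 1 := by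
  induction rs with
  | nil => rfl
  | cons u r ih =>
    cases r with
    | nil => rfl
    | cons v r' =>
      simp only [pvGoRec, List.length_cons] at *
      omega

theorem pvGoRec_getD (rs : List (List Int)) :
    ∀ i, i < 2 * rs.length - 1 → (pvGoRec rs).getD i [] =
      if i % 2 = 0 then pvHexpand (rs.getD (i / 2) [])
      else pvVmid (rs.getD (i / 2) []) (rs.getD (i / 2 + 1) []) := by
  induction rs with
  | nil => intro i hi; simp at hi
  | cons u r ih =>
    cases r with
    | nil =>
      intro i hi
      simp only [List.length_cons, List.length_nil] at hi
      have : i = 0 := by omega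
      subst this
      simp [pvGoRec]
    | cons v r' =>
      intro i hi
      simp only [List.length_cons] at hi
      match i with
      | 0 => simp [pvGoRec]
      | 1 => simp [pvGoRec]
      | (i + 2) =>
        simp only [pvGoRec, List.getD_cons_succ]
        rw [ih i (by simp only [List.length_cons]; omega)]
        have h2 : (i + 2) % 2 = i % 2 := by omega
        have h3 : (i + 2) / 2 = i / 2 + 1 := by omega
        rw [h2, h3]
        split <;> simp

def pvCell (rows : List (List Int)) (i j : Nat) : Int :=
  if i % 2 = 0 then
    if j % 2 = 0 then pvGet2 rows (i / 2) (j / 2)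
    else Int.tdiv (pvGet2 rows (i / 2) (j / 2) + pvGet2 rows (i / 2) (j / 2 + 1)) 2
  else
    if j % 2 = 0 then
      Int.tdiv (pvGet2 rows (i / 2 + 1) (j / 2) + pvGet2 rows (i / 2) (j / 2)) 2
    else
      Int.tdiv (pvGet2 rows (i / 2) (j / 2) + pvGet2 rows (i / 2 + 1) (j / 2 + 1) +
                pvGet2 rows (i / 2) (j / 2 + 1) + pvGet2 rows (i / 2 + 1) (j / 2)) 4

theorem pvVal_to_cell (rows g2 : List (List Int)) (n m : Nat)
    (hg2 : ∀ a b, a % 2 = 0 → b % 2 = 0 → a / 2 < n → b / 2 < m →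
      pvGet2 g2 a b = pvGet2 rows (a / 2) (b / 2)) :
    ∀ a b, a < 2 * n - 1 → b < 2 * m - 1 →
      pvVal g2 (2 * n - 1) (2 * m - 1) a b = pvCell rows a b := by
  intro a b ha hb
  rcases Nat.mod_two_eq_zero_or_one a with ha2 | ha2 <;>
    rcases Nat.mod_two_eq_zero_or_one b with hb2 | hb2
  · rw [pvVal_ee _ _ _ _ _ ha2 hb2, hg2 a b ha2 hb2 (by omega) (by omega)]
    unfold pvCell
    rw [if_pos ha2, if_pos hb2]
  · unfold pvVal
    rw [if_pos (show (b ≠ 0 ∧ b ≠ (2 * m - 1) - 1) ∧ a % 2 = 0 ∧ b % 2 = 1 by omega)]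
    rw [hg2 a (b - 1) ha2 (by omega) (by omega) (by omega),
        hg2 a (b + 1) ha2 (by omega) (by omega) (by omega)]
    have e1 : (b - 1) / 2 = b / 2 := by omega
    have e2 : (b + 1) / 2 = b / 2 + 1 := by omega
    rw [e1, e2]
    unfold pvCell
    rw [if_pos ha2, if_neg (by omega)]
  · unfold pvVal
    rw [if_neg (by omega),
        if_pos (show (a ≠ 0 ∧ a ≠ (2 * n - 1) - 1) ∧ a % 2 = 1 ∧ b % 2 = 0 by omega)]
    rw [hg2 (a + 1) b (by omega) hb2 (by omega) (by omega),
        hg2 (a - 1) b (by omega) hb2 (by omega) (by omega)]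
    have e1 : (a - 1) / 2 = a / 2 := by omega
    have e2 : (a + 1) / 2 = a / 2 + 1 := by omega
    rw [e1, e2]
    unfold pvCell
    rw [if_neg (by omega), if_pos hb2]
  · unfold pvVal
    rw [if_neg (by omega), if_neg (by omega),
        if_pos (show (a ≠ 0 ∧ a ≠ (2 * n - 1) - 1 ∧ b ≠ 0 ∧ b ≠ (2 * m - 1) - 1) ∧
          a % 2 = 1 ∧ b % 2 = 1 by omega)]
    rw [hg2 (a - 1) (b - 1) (by omega) (by omega) (by omega) (by omega),
        hg2 (a + 1) (b + 1) (by omega) (by omega) (by omega) (by omega),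
        hg2 (a - 1) (b + 1) (by omega) (by omega) (by omega) (by omega),
        hg2 (a + 1) (b - 1) (by omega) (by omega) (by omega) (by omega)]
    have e1 : (a - 1) / 2 = a / 2 := by omega
    have e2 : (a + 1) / 2 = a / 2 + 1 := by omega
    have e3 : (b - 1) / 2 = b / 2 := by omega
    have e4 : (b + 1) / 2 = b / 2 + 1 := by omega
    rw [e1, e2, e3, e4]
    unfold pvCell
    rw [if_neg (by omega), if_neg (by omega)]

theorem expansao_char (rows : List (List Int)) (hn : 0 < rows.length) :
    pvOk (2 * rows.length - 1) (2 * (rows.getD 0 []).length - 1) (expansao rows) ∧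
    ∀ a b, a < 2 * rows.length - 1 → b < 2 * (rows.getD 0 []).length - 1 →
      pvGet2 (expansao rows) a b = pvCell rows a b := by
  set n := rows.length with hn'
  set m := (rows.getD 0 []).length with hm'
  have hok1 := pvPhase1_ok n m
  obtain ⟨hok2, hch2⟩ := pvPhase2_char rows (2 * n - 1) (2 * m - 1) m (by omega) n (by omega)
    (pvPhase1 n m) hok1
  have hg2d : expansao rows =
      pvPhase3 (pvPhase2 rows n m (pvPhase1 n m)).length
        (((pvPhase2 rows n m (pvPhase1 n m)).getD 0 []).length)
        (pvPhase2 rows n m (pvPhase1 n m)) := rfl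
  have hH : (pvPhase2 rows n m (pvPhase1 n m)).length = 2 * n - 1 := hok2.1
  have hW : ((pvPhase2 rows n m (pvPhase1 n m)).getD 0 []).length = 2 * m - 1 :=
    hok2.2 0 (by omega)
  rw [hg2d, hH, hW]
  obtain ⟨hok3, hch3⟩ := pvPhase3_char (pvPhase2 rows n m (pvPhase1 n m)) (2 * n - 1)
    (2 * m - 1) hok2
  refine ⟨hok3, fun a b ha hb => ?_⟩
  rw [hch3 a b ha hb]
  refine pvVal_to_cell rows _ n m ?_ a b ha hb
  intro a b ha2 hb2 han hbm
  rw [show pvGet2 (pvPhase2 rows n m (pvPhase1 n m)) a b =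
        pvGet2 ((List.range n).foldl
          (fun g i => (List.range m).foldl (pvPhase2Body rows i) g) (pvPhase1 n m)) a b from rfl,
      hch2 a b, if_pos ⟨ha2, han, hb2, hbm⟩]

theorem pvHeadD_eq_getD (rows : List (List Int)) : rows.headD [] = rows.getD 0 [] := by
  cases rows <;> rfl

theorem pvAlt_char (rows : List (List Int)) (hpre : Pre_expansao rows) (hn : 0 < rows.length) :
    pvOk (2 * rows.length - 1) (2 * (rows.getD 0 []).length - 1) (expansao_alt rows) ∧
    ∀ a b, a < 2 * rows.length - 1 → b < 2 * (rows.getD 0 []).length - 1 →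
      pvGet2 (expansao_alt rows) a b = pvCell rows a b := by
  set n := rows.length with hn'
  set m := (rows.getD 0 []).length with hm'
  set rs := rows.map (fun r => r.take m) with hrs
  have hlen_rs : rs.length = n := by rw [hrs, List.length_map]
  have hrow_rs : ∀ a, a < n → rs.getD a [] = (rows.getD a []).take m := by
    intro a ha
    rw [List.getD_eq_getElem _ _ (by rw [hlen_rs]; exact ha), List.getElem_map,
        List.getD_eq_getElem _ _ ha]
  have hlen_row : ∀ a, a < n → (rs.getD a []).length = m := by
    intro a ha
    rw [hrow_rs a ha, List.length_take]
    have : m ≤ (rows.getD a []).length := by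
      have hmem : rows.getD a [] ∈ rows := by
        rw [List.getD_eq_getElem _ _ ha]; exact List.getElem_mem _
      have := hpre _ hmem
      rwa [pvHeadD_eq_getD] at this
    omega
  have hget_rs : ∀ a t, a < n → t < m → (rs.getD a []).getD t 0 = pvGet2 rows a t := by
    intro a t ha ht
    rw [hrow_rs a ha]
    unfold pvGet2
    rw [List.getD_eq_getElem?_getD (l := (rows.getD a []).take m), List.getElem?_take,
        if_pos ht, ← List.getD_eq_getElem?_getD]
  have halt : expansao_alt rows = pvGoRec rs := by
    rw [expansao_alt_eq_go, pvHeadD_eq_getD]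
  rw [halt]
  have hrowlen : ∀ a, a < 2 * n - 1 → ((pvGoRec rs).getD a []).length = 2 * m - 1 := by
    intro a ha
    rw [pvGoRec_getD rs a (by rw [hlen_rs]; omega)]
    rcases Nat.mod_two_eq_zero_or_one a with ha2 | ha2
    · rw [if_pos ha2, pvHexpand_eq_rec, pvHexpandRec_length, hlen_row _ (by omega)]
    · rw [if_neg (by omega), pvVmid_eq_rec, pvVmidRec_length, hlen_row _ (by omega)]
  refine ⟨⟨by rw [pvGoRec_length, hlen_rs], hrowlen⟩, ?_⟩
  intro a b ha hb
  unfold pvGet2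
  rw [pvGoRec_getD rs a (by rw [hlen_rs]; omega)]
  rcases Nat.mod_two_eq_zero_or_one a with ha2 | ha2
  · rw [if_pos ha2, pvHexpand_eq_rec,
        pvHexpandRec_getD _ b (by rw [hlen_row _ (by omega)]; omega)]
    rcases Nat.mod_two_eq_zero_or_one b with hb2 | hb2
    · rw [if_pos hb2, hget_rs _ _ (by omega) (by omega)]
      unfold pvCell
      rw [if_pos ha2, if_pos hb2]
    · rw [if_neg (by omega), hget_rs _ _ (by omega) (by omega),
          hget_rs _ _ (by omega) (by omega)]
      unfold pvCell
      rw [if_pos ha2, if_neg (by omega)]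
  · rw [if_neg (by omega), pvVmid_eq_rec,
        pvVmidRec_getD _ _ b (by rw [hlen_row _ (by omega)]; omega)]
    rcases Nat.mod_two_eq_zero_or_one b with hb2 | hb2
    · rw [if_pos hb2, hget_rs _ _ (by omega) (by omega), hget_rs _ _ (by omega) (by omega)]
      unfold pvCell
      rw [if_neg (by omega), if_pos hb2, Int.add_comm]
    · rw [if_neg (by omega), hget_rs _ _ (by omega) (by omega),
          hget_rs _ _ (by omega) (by omega), hget_rs _ _ (by omega) (by omega),
          hget_rs _ _ (by omega) (by omega)]
      unfold pvCell
      rw [if_neg (by omega), if_neg (by omega)]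
      congr 1
      ring

theorem pvGrid_ext (g h : List (List Int)) (H W : Nat)
    (hg : pvOk H W g) (hh : pvOk H W h)
    (hv : ∀ a b, a < H → b < W → pvGet2 g a b = pvGet2 h a b) : g = h := by
  apply List.ext_getElem (by rw [hg.1, hh.1])
  intro a h1 h2
  have haH : a < H := by rw [← hg.1]; exact h1
  have hga : g.getD a [] = g[a] := List.getD_eq_getElem _ _ h1
  have hha : h.getD a [] = h[a] := List.getD_eq_getElem _ _ h2
  apply List.ext_getElem
  · have := hg.2 a haH
    have := hh.2 a haH
    rw [hga] at *
    rw [hha] at *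
    omega
  · intro b hb1 hb2
    have hbW : b < W := by
      have := hg.2 a haH
      rw [hga] at this
      omega
    have := hv a b haH hbW
    unfold pvGet2 at this
    rw [hga, hha] at this
    rwa [List.getD_eq_getElem _ _ hb1, List.getD_eq_getElem _ _ hb2] at this

theorem expansao_eq_alt (rows : List (List Int)) (hpre : Pre_expansao rows) :
    expansao rows = expansao_alt rows := by
  cases rows with
  | nil => rfl
  | cons r rest =>
    obtain ⟨hokA, hchA⟩ := expansao_char (r :: rest) (by simp)
    obtain ⟨hokB, hchB⟩ := pvAlt_char (r :: rest) hpre (by simp)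
    exact pvGrid_ext _ _ _ _ hokA hokB
      (fun a b ha hb => by rw [hchA a b ha hb, hchB a b ha hb])

-- ===== VERDICT (by name: the statement is the Claim_ definition above) =====
theorem expansao_spec : Claim_equal_expansao := by
  intro rows _ hpre
  unfold Spec_expansao
  exact expansao_eq_alt rows hpre
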